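-- pv_equiv track=rewrite | github.com/renehlavova/advent-of-code | 2022/2022-12-02.py | find_xyz
-- ===== SOURCE A (Python) =====
-- def find_xyz(game_list):
--     """
--     Scissors, paper, rock
--     X means you need to lose
--     Y means you need to end the round in a draw
--     Z means you need to win
--     """
--     for game in game_list:
--         if game[1] == "Z":
--             if game[0] == "A":
--                 game[1] = "B"
--             elif game[0] == "B":
--                 game[1] = "C"
--             elif game[0] == "C":
--                 game[1] = "A"
--         elif game[1] == "Y":
--             if game[0] == "A":
--                 game[1] = "A"
--             elif game[0] == "B":
--                 game[1] = "B"
--             elif game[0] == "C":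
--                 game[1] = "C"
--         elif game[1] == "X":
--             if game[0] == "A":
--                 game[1] = "C"
--             elif game[0] == "B":
--                 game[1] = "A"
--             elif game[0] == "C":
--                 game[1] = "B"
--     return game_list
-- ===== SOURCE B (Python) =====
-- def find_xyz(game_list):
--     for game in game_list:
--         first, second = game[0], game[1]
--         if first in ("A", "B", "C") and second in ("X", "Y", "Z"):
--             move = ord(first) - 65          # A=0, B=1, C=2
--             offset = ord(second) - 89       # X=-1 (lose), Y=0 (draw), Z=+1 (win)
--             game[1] = chr((move + offset) % 3 + 65)
--     return game_list
-- ===== Notes on version B (the rewrite author's own statement) =====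
-- stated objective: simpler
-- what changed: Replaces A's 3x3 nested if/elif lookup table with a single guard plus one modular-arithmetic formula chr((move + offset) % 3 + 65) computing the required move.
import Mathlib
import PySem

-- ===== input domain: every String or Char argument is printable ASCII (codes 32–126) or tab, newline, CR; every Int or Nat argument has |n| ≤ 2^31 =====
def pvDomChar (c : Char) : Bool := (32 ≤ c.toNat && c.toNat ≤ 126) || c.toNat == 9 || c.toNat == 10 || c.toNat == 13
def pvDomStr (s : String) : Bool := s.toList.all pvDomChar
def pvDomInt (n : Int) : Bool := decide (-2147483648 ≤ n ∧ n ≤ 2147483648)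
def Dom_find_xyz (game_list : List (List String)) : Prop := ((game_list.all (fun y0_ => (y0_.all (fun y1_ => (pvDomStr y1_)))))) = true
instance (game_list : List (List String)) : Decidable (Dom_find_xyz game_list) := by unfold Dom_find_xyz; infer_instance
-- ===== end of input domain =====

-- B replaces A's 3×3 table of nested if/elif branches by one modular-arithmetic formula
-- (chr((move + offset) % 3 + 65)); A mutates game_list in place, the equivalence is about the return value.

-- ===== PORT A =====
-- per-round body of A's loop: the nested if/elif table, game[1] assignment = List.set
def findStepA (game : List String) : List String :=
  match PySem.List.pyGet? game 1 with
  | none => game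
  | some b =>
    match PySem.List.pyGet? game 0 with
    | none => game
    | some a =>
      if b = "Z" then
        if a = "A" then game.set 1 "B"
        else if a = "B" then game.set 1 "C"
        else if a = "C" then game.set 1 "A"
        else game
      else if b = "Y" then
        if a = "A" then game.set 1 "A"
        else if a = "B" then game.set 1 "B"
        else if a = "C" then game.set 1 "C"
        else game
      else if b = "X" then
        if a = "A" then game.set 1 "C"
        else if a = "B" then game.set 1 "A"
        else if a = "C" then game.set 1 "B"
        else game
      else game

def find_xyz (game_list : List (List String)) : List (List String) :=
  game_list.map findStepA

-- ===== PORT B =====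
-- Python ord on a one-character string (only ever applied to "A".."C"/"X".."Z" under B's guard)
def pyOrd1 (s : String) : Int := ((s.toList.headD ' ').toNat : Int)
-- Python chr for the code points B produces
def pyChr1 (n : Int) : String := String.ofList [Char.ofNat n.toNat]

def findStepB (game : List String) : List String :=
  match PySem.List.pyGet? game 0, PySem.List.pyGet? game 1 with
  | some first, some second =>
    if (first = "A" || first = "B" || first = "C") &&
       (second = "X" || second = "Y" || second = "Z") then
      game.set 1 (pyChr1 (PySem.Int.mod (pyOrd1 first - 65 + (pyOrd1 second - 89)) 3 + 65))
    else game
  | _, _ => game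

def find_xyz_alt (game_list : List (List String)) : List (List String) :=
  game_list.map findStepB

-- ===== PRECONDITION & SPEC =====
-- Pre_ excludes exactly the inputs where A raises IndexError: some round shorter than 2 entries.
def Pre_find_xyz (game_list : List (List String)) : Prop :=
  ∀ g ∈ game_list, 2 ≤ g.length
instance (game_list : List (List String)) : Decidable (Pre_find_xyz game_list) := by
  unfold Pre_find_xyz; infer_instance

def pvWitness_find_xyz : List (List String) := [["A", "Z"], ["C", "X"], ["B", "Y"], ["D", "Q"]]

def Spec_find_xyz (game_list : List (List String)) (out : List (List String)) : Prop := out = find_xyz_alt game_list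
instance (game_list : List (List String)) (out : List (List String)) : Decidable (Spec_find_xyz game_list out) := by unfold Spec_find_xyz; infer_instance

-- ===== CLAIM (what is proved, stated in full; the proofs are below) =====
def Claim_equal_find_xyz : Prop := ∀ (game_list : List (List String)), Dom_find_xyz game_list → Pre_find_xyz game_list → Spec_find_xyz game_list (find_xyz game_list)

-- ===== LEMMAS AND PROOFS =====

theorem step_eq (game : List String) (h : 2 ≤ game.length) :
    findStepA game = findStepB game := by
  match game, h with
  | x :: y :: t, _ =>
    have h0 : PySem.List.pyGet? (x::y::t) 0 = some x := PySem.List.pyGet?_zero_cons x (y::t)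
    have h1 : PySem.List.pyGet? (x::y::t) 1 = some y := by
      rw [show (1:Int)=((1:Nat):Int) from rfl, PySem.List.pyGet?_natCast]; rfl
    simp only [findStepA, findStepB, h0, h1]
    by_cases hx : x = "A" <;> by_cases hx' : x = "B" <;> by_cases hx'' : x = "C" <;>
      by_cases hy : y = "X" <;> by_cases hy' : y = "Y" <;> by_cases hy'' : y = "Z" <;>
      simp_all <;> decide

-- ===== VERDICT (by name: the statement is the Claim_ definition above) =====
theorem find_xyz_spec : Claim_equal_find_xyz := by
  intro gl _ hpre
  unfold Spec_find_xyz find_xyz find_xyz_alt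
  exact List.map_congr_left fun g hg => step_eq g (hpre g hg)
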